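-- pv_equiv track=rewrite | github.com/evg-n/algorithms-yandex-praktikum | sprint_2/largest_rectangle_in_histogram.py | calculate_borders
-- ===== SOURCE A (Python) =====
-- from typing import List
--
-- def calculate_borders(hist: List[int], left=True):
--     stack = [0 if left else len(hist) - 1]
--     borders = [-1 if left else len(hist)]
--
--     if left:
--         indexes = range(1, len(hist))
--     else:
--         indexes = range(len(hist) - 2, -1, -1)
--
--     for i in indexes:
--         cur_height = hist[i]
--
--         while stack and hist[stack[-1]] >= cur_height:
--             stack.pop()
--         if not stack:
--             borders.append(-1 if left else len(hist))
--         else: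
--             borders.append(stack[-1])
--         stack.append(i)
--
--     return borders if left else list(reversed(borders))
-- ===== SOURCE B (Python) =====
-- from typing import List
--
-- def calculate_borders(hist: List[int], left=True):
--     # Jump-pointer scan: the borders array itself is the jump table.
--     n = len(hist)
--     if left:
--         border = [-1] * max(n, 1)
--         for i in range(1, n):
--             p = i - 1
--             while p != -1 and hist[p] >= hist[i]:
--                 p = border[p]
--             border[i] = p
--         return border
--     border = [n] * max(n, 1)
--     for i in range(n - 2, -1, -1):
--         p = i + 1
--         while p != n and hist[p] >= hist[i]:
--             p = border[p]
--         border[i] = p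
--     return border
-- ===== Notes on version B (the rewrite author's own statement) =====
-- stated objective: alternative
-- what changed: Replaces the explicit monotonic stack (pop loop on a growing/shrinking stack list, appending to an output list) with a jump-pointer scan that uses the partially built borders array itself as a jump table (p = border[p]), writing results into a pre-sized array; no stack exists at all.
import Mathlib
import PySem

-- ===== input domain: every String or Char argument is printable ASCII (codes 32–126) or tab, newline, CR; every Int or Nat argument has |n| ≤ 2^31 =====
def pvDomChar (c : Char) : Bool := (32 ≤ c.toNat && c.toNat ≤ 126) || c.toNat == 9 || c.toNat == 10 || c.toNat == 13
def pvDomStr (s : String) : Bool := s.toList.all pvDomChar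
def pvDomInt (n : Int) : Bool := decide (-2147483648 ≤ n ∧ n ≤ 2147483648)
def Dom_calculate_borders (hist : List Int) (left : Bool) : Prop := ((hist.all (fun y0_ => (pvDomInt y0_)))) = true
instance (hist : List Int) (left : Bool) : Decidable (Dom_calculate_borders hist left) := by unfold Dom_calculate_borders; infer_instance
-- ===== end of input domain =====

-- B replaces A's monotonic stack by a jump-pointer scan that uses the borders array itself
-- as the jump table (alternative decomposition, same values on every input).

-- ===== PORT A =====
-- `while stack and hist[stack[-1]] >= cur_height: stack.pop()`; stack elements are always
-- valid indices into hist, so the pyGetD default 0 is never consulted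
def pvPop (hist : List Int) (cur : Int) (stack : List Int) : List Int :=
  match h : stack.getLast? with
  | none => stack
  | some t =>
    if cur ≤ PySem.List.pyGetD hist t 0 then
      pvPop hist cur stack.dropLast
    else stack
termination_by stack.length
decreasing_by
  have hne : stack ≠ [] := by intro e; subst e; simp at h
  have := List.length_pos_iff.mpr hne
  simp [List.length_dropLast]; omega

-- body of A's `for i in indexes` loop, state = (stack, borders)
def pvStepA (hist : List Int) (left : Bool) (st : List Int × List Int) (i : Int) : List Int × List Int :=
  let cur := PySem.List.pyGetD hist i 0
  let stack := pvPop hist cur st.1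
  let b : Int := match stack.getLast? with
    | none => if left then -1 else (hist.length : Int)
    | some t => t
  (stack ++ [i], st.2 ++ [b])

def calculate_borders (hist : List Int) (left : Bool) : List Int :=
  let n : Int := hist.length
  let indexes : List Int :=
    if left then PySem.List.pyRange 1 n 1 else PySem.List.pyRange (n - 2) (-1) (-1)
  let res := indexes.foldl (pvStepA hist left)
    ([if left then 0 else n - 1], [if left then -1 else n])
  if left then res.2 else res.2.reverse

-- ===== PORT B =====
-- `while p != -1 and hist[p] >= hist[i]: p = border[p]`; the fuel argument (len hist + 1)
-- only makes the recursion structural — the pointer strictly decreases through the borders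
-- array, so the fuel is never exhausted on the states the fold reaches
def pvJumpL (hist border : List Int) (cur : Int) : Int → Nat → Int
  | p, 0 => p
  | p, f + 1 =>
    if p ≠ -1 ∧ cur ≤ PySem.List.pyGetD hist p 0 then
      pvJumpL hist border cur (PySem.List.pyGetD border p 0) f
    else p

-- `while p != n and hist[p] >= hist[i]: p = border[p]` (right case, pointer increases)
def pvJumpR (n : Int) (hist border : List Int) (cur : Int) : Int → Nat → Int
  | p, 0 => p
  | p, f + 1 =>
    if p ≠ n ∧ cur ≤ PySem.List.pyGetD hist p 0 then
      pvJumpR n hist border cur (PySem.List.pyGetD border p 0) f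
    else p

-- body of B's left loop: border[i] = jump from i-1
def pvStepBL (hist : List Int) (border : List Int) (i : Int) : List Int :=
  border.set i.toNat
    (pvJumpL hist border (PySem.List.pyGetD hist i 0) (i - 1) (hist.length + 1))

-- body of B's right loop: border[i] = jump from i+1
def pvStepBR (hist : List Int) (border : List Int) (i : Int) : List Int :=
  border.set i.toNat
    (pvJumpR (hist.length : Int) hist border (PySem.List.pyGetD hist i 0) (i + 1)
      (hist.length + 1))

def calculate_borders_alt (hist : List Int) (left : Bool) : List Int :=
  let n : Int := hist.length
  if left then
    (PySem.List.pyRange 1 n 1).foldl (pvStepBL hist)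
      (List.replicate (max hist.length 1) (-1))
  else
    (PySem.List.pyRange (n - 2) (-1) (-1)).foldl (pvStepBR hist)
      (List.replicate (max hist.length 1) n)

-- ===== PRECONDITION & SPEC =====
def Spec_calculate_borders (hist : List Int) (left : Bool) (out : List Int) : Prop := out = calculate_borders_alt hist left
instance (hist : List Int) (left : Bool) (out : List Int) : Decidable (Spec_calculate_borders hist left out) := by unfold Spec_calculate_borders; infer_instance

-- ===== CLAIM (what is proved, stated in full; the proofs are below) =====
def Claim_equal_calculate_borders : Prop := ∀ (hist : List Int) (left : Bool), Dom_calculate_borders hist left → Spec_calculate_borders hist left (calculate_borders hist left)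

-- ===== LEMMAS AND PROOFS =====

-- The jump chain of B's borders array, read from pointer p downwards (left case):
-- this is exactly A's stack read top-to-bottom.  The `min` only forces termination;
-- under the invariant `invL` it is the identity.
def chainL (bs : List Int) (p : Int) : List Int :=
  if p < 0 then [] else p :: chainL bs (min (PySem.List.pyGetD bs p 0) (p - 1))
termination_by (p + 1).toNat
decreasing_by omega

-- the same chain for the right case, pointer increasing towards n
def chainR (n : Int) (bs : List Int) (p : Int) : List Int :=
  if n ≤ p then [] else p :: chainR n bs (max (PySem.List.pyGetD bs p 0) (p + 1))
termination_by (n - p).toNat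
decreasing_by omega

-- invariants of B's borders array
def invL (bs : List Int) : Prop :=
  ∀ k : Nat, k < bs.length → -1 ≤ bs.getD k 0 ∧ bs.getD k 0 < (k : Int)

def invR (n : Int) (bs : List Int) : Prop :=
  ∀ k : Nat, k < bs.length → (k : Int) < bs.getD k 0 ∧ bs.getD k 0 ≤ n

lemma getD_set_ne (xs : List Int) (i k : Nat) (v : Int) (h : k ≠ i) :
    (xs.set i v).getD k 0 = xs.getD k 0 := by
  simp [List.getD, List.getElem?_set_ne (by omega : i ≠ k)]

lemma getD_set_self (xs : List Int) (i : Nat) (v : Int) (h : i < xs.length) :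
    (xs.set i v).getD i 0 = v := by
  simp [List.getD, h]

lemma map_getD_range (xs : List Int) :
    (List.range xs.length).map (fun k => xs.getD k 0) = xs := by
  apply List.ext_getElem <;> simp [List.getD]
  intro i h1 h2
  simp [List.getElem?_eq_getElem h1]

lemma pvPop_nil (hist : List Int) (cur : Int) : pvPop hist cur [] = [] := by
  rw [pvPop]
  rfl

lemma pvPop_concat (hist : List Int) (cur : Int) (l : List Int) (t : Int) :
    pvPop hist cur (l ++ [t])
      = if cur ≤ PySem.List.pyGetD hist t 0 then pvPop hist cur l else l ++ [t] := by
  rw [pvPop]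
  split
  · rename_i heq
    rw [List.getLast?_concat] at heq
    exact absurd heq (by simp)
  · rename_i t' heq
    rw [List.getLast?_concat] at heq
    obtain rfl : t = t' := by injection heq
    rw [List.dropLast_concat]

lemma chainL_nil (bs : List Int) (p : Int) (h : p < 0) : chainL bs p = [] := by
  rw [chainL]; simp [h]

lemma chainL_cons (bs : List Int) (p : Int) (h : 0 ≤ p) :
    chainL bs p = p :: chainL bs (min (PySem.List.pyGetD bs p 0) (p - 1)) := by
  rw [chainL]; simp [not_lt.mpr h]

lemma chainR_nil (n : Int) (bs : List Int) (p : Int) (h : n ≤ p) : chainR n bs p = [] := by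
  rw [chainR]; simp [h]

lemma chainR_cons (n : Int) (bs : List Int) (p : Int) (h : p < n) :
    chainR n bs p = p :: chainR n bs (max (PySem.List.pyGetD bs p 0) (p + 1)) := by
  rw [chainR]; simp [not_le.mpr h]

-- setting an entry above the chain head does not change the chain (left: pointers decrease)
lemma chainL_set (bs : List Int) (i : Nat) (v : Int) :
    ∀ (k : Nat) (p : Int), (p + 1).toNat ≤ k → p < (i : Int) →
      chainL (bs.set i v) p = chainL bs p := by
  intro k
  induction k with
  | zero => intro p hk _; rw [chainL_nil _ _ (by omega), chainL_nil _ _ (by omega)]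
  | succ k ih =>
    intro p hk hpi
    by_cases hp : p < 0
    · rw [chainL_nil _ _ hp, chainL_nil _ _ hp]
    · push Not at hp
      rw [chainL_cons _ _ hp, chainL_cons _ _ hp]
      have hget : PySem.List.pyGetD (bs.set i v) p 0 = PySem.List.pyGetD bs p 0 := by
        rw [PySem.List.pyGetD_of_nonneg _ _ hp, PySem.List.pyGetD_of_nonneg _ _ hp]
        exact getD_set_ne _ _ _ _ (by omega)
      rw [hget]
      congr 1
      exact ih _ (by omega) (by omega)

-- setting an entry below the chain head does not change the chain (right: pointers increase)
lemma chainR_set (n : Int) (bs : List Int) (i : Nat) (v : Int) :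
    ∀ (k : Nat) (p : Int), (n - p).toNat ≤ k → (i : Int) < p →
      chainR n (bs.set i v) p = chainR n bs p := by
  intro k
  induction k with
  | zero => intro p hk _; rw [chainR_nil _ _ _ (by omega), chainR_nil _ _ _ (by omega)]
  | succ k ih =>
    intro p hk hpi
    by_cases hp : n ≤ p
    · rw [chainR_nil _ _ _ hp, chainR_nil _ _ _ hp]
    · push Not at hp
      have hp0 : (0:Int) ≤ p := by omega
      rw [chainR_cons _ _ _ hp, chainR_cons _ _ _ hp]
      have hget : PySem.List.pyGetD (bs.set i v) p 0 = PySem.List.pyGetD bs p 0 := by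
        rw [PySem.List.pyGetD_of_nonneg _ _ hp0, PySem.List.pyGetD_of_nonneg _ _ hp0]
        exact getD_set_ne _ _ _ _ (by omega)
      rw [hget]
      congr 1
      exact ih _ (by omega) (by omega)

-- A's pop loop on the reversed chain IS B's jump loop (left case)
lemma jumpL_spec (hist bs : List Int) (cur : Int) (hinv : invL bs) :
    ∀ (f : Nat) (p : Int), -1 ≤ p → p < (bs.length : Int) → (p + 1).toNat ≤ f →
      pvPop hist cur ((chainL bs p).reverse)
          = (chainL bs (pvJumpL hist bs cur p f)).reverse
        ∧ -1 ≤ pvJumpL hist bs cur p f ∧ pvJumpL hist bs cur p f ≤ p := by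
  intro f
  induction f with
  | zero =>
    intro p h1 h2 h3
    have : p = -1 := by omega
    subst this
    simp [pvJumpL, pvPop_nil, chainL_nil bs (-1) (by norm_num)]
  | succ f ih =>
    intro p h1 h2 h3
    by_cases hp : p = -1
    · subst hp
      simp [pvJumpL, pvPop_nil, chainL_nil bs (-1) (by norm_num)]
    · have hp0 : (0:Int) ≤ p := by omega
      have hbsp := hinv p.toNat (by omega)
      have hget : PySem.List.pyGetD bs p 0 = bs.getD p.toNat 0 :=
        PySem.List.pyGetD_of_nonneg _ _ hp0
      have hmin : min (PySem.List.pyGetD bs p 0) (p - 1) = PySem.List.pyGetD bs p 0 := by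
        rw [hget]; omega
      rw [chainL_cons bs p hp0, hmin]
      by_cases hc : cur ≤ PySem.List.pyGetD hist p 0
      · -- pop p / jump to bs[p]
        have hpop : pvPop hist cur ((chainL bs (PySem.List.pyGetD bs p 0)).reverse ++ [p])
            = pvPop hist cur ((chainL bs (PySem.List.pyGetD bs p 0)).reverse) := by
          rw [pvPop_concat, if_pos hc]
        have hj : pvJumpL hist bs cur p (f + 1)
            = pvJumpL hist bs cur (PySem.List.pyGetD bs p 0) f := by
          simp [pvJumpL, hp, hc]
        have := ih (PySem.List.pyGetD bs p 0) (by omega) (by omega) (by omega)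
        refine ⟨?_, by omega, by omega⟩
        rw [List.reverse_cons, hpop, hj]
        exact this.1
      · -- stop
        have hj : pvJumpL hist bs cur p (f + 1) = p := by
          simp [pvJumpL, hc]
        rw [hj, chainL_cons bs p hp0, hmin]
        refine ⟨?_, by omega, by omega⟩
        rw [List.reverse_cons, pvPop_concat, if_neg hc]

-- A's pop loop on the reversed chain IS B's jump loop (right case)
lemma jumpR_spec (hist bs : List Int) (n cur : Int) (hn : n = (bs.length : Int))
    (hinv : invR n bs) :
    ∀ (f : Nat) (p : Int), 0 ≤ p → p ≤ n → (n - p).toNat ≤ f →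
      pvPop hist cur ((chainR n bs p).reverse)
          = (chainR n bs (pvJumpR n hist bs cur p f)).reverse
        ∧ p ≤ pvJumpR n hist bs cur p f ∧ pvJumpR n hist bs cur p f ≤ n := by
  intro f
  induction f with
  | zero =>
    intro p h1 h2 h3
    have hpn : p = n := by omega
    simp [hpn, pvJumpR, pvPop_nil, chainR_nil n bs n le_rfl]
  | succ f ih =>
    intro p h1 h2 h3
    by_cases hp : p = n
    · simp [hp, pvJumpR, pvPop_nil, chainR_nil n bs n le_rfl]
    · have hpn : p < n := by omega
      have hbsp := hinv p.toNat (by omega)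
      have hget : PySem.List.pyGetD bs p 0 = bs.getD p.toNat 0 :=
        PySem.List.pyGetD_of_nonneg _ _ h1
      have hmax : max (PySem.List.pyGetD bs p 0) (p + 1) = PySem.List.pyGetD bs p 0 := by
        rw [hget]; omega
      rw [chainR_cons n bs p hpn, hmax]
      by_cases hc : cur ≤ PySem.List.pyGetD hist p 0
      · have hpop : pvPop hist cur ((chainR n bs (PySem.List.pyGetD bs p 0)).reverse ++ [p])
            = pvPop hist cur ((chainR n bs (PySem.List.pyGetD bs p 0)).reverse) := by
          rw [pvPop_concat, if_pos hc]
        have hj : pvJumpR n hist bs cur p (f + 1)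
            = pvJumpR n hist bs cur (PySem.List.pyGetD bs p 0) f := by
          simp [pvJumpR, hp, hc]
        have := ih (PySem.List.pyGetD bs p 0) (by omega) (by omega) (by omega)
        refine ⟨?_, by omega, by omega⟩
        rw [List.reverse_cons, hpop, hj]
        exact this.1
      · have hj : pvJumpR n hist bs cur p (f + 1) = p := by
          simp [pvJumpR, hc]
        rw [hj, chainR_cons n bs p hpn, hmax]
        refine ⟨?_, by omega, by omega⟩
        rw [List.reverse_cons, pvPop_concat, if_neg hc]

-- main loop invariant, left case
lemma foldL (hist : List Int) :
    ∀ (k m : Nat) (stack out bs : List Int),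
      m + k = hist.length → 1 ≤ m →
      bs.length = hist.length → invL bs →
      stack = (chainL bs ((m : Int) - 1)).reverse →
      out = (List.range m).map (fun j => bs.getD j 0) →
      ((PySem.List.pyRange (m : Int) (hist.length : Int) 1).foldl (pvStepA hist true)
          (stack, out)).2
        = (List.range hist.length).map (fun j =>
            ((PySem.List.pyRange (m : Int) (hist.length : Int) 1).foldl (pvStepBL hist)
              bs).getD j 0)
      ∧ ((PySem.List.pyRange (m : Int) (hist.length : Int) 1).foldl (pvStepBL hist)
          bs).length = hist.length := by
  intro k
  induction k with
  | zero =>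
    intro m stack out bs hmk hm1 hlen hinv hstack hout
    have hmn : m = hist.length := by omega
    rw [PySem.List.pyRange_one_eq_nil (by exact_mod_cast hmn.ge)]
    simp only [List.foldl_nil]
    exact ⟨by rw [hout, hmn], hlen⟩
  | succ k ih =>
    intro m stack out bs hmk hm1 hlen hinv hstack hout
    have hmn : m < hist.length := by omega
    rw [PySem.List.pyRange_one_cons (by exact_mod_cast hmn)]
    simp only [List.foldl_cons]
    obtain ⟨hpop, hq1, hq2⟩ :=
      jumpL_spec hist bs (PySem.List.pyGetD hist (m : Int) 0) hinv (hist.length + 1)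
        ((m : Int) - 1) (by omega) (by rw [hlen]; omega) (by omega)
    set q := pvJumpL hist bs (PySem.List.pyGetD hist (m : Int) 0) ((m : Int) - 1)
      (hist.length + 1) with hqdef
    have hL : (chainL bs q).reverse.getLast? = some q
        ∨ (q = -1 ∧ (chainL bs q).reverse.getLast? = none) := by
      by_cases hq : q < 0
      · refine Or.inr ⟨by omega, ?_⟩
        rw [show q = -1 by omega, chainL_nil bs (-1) (by norm_num)]
        rfl
      · refine Or.inl ?_
        rw [chainL_cons bs q (by omega), List.getLast?_reverse]
        rfl
    have hstepA : pvStepA hist true (stack, out) (m : Int)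
        = ((chainL bs q).reverse ++ [(m : Int)], out ++ [q]) := by
      simp only [pvStepA, hstack, hpop]
      rcases hL with h | ⟨hq', h⟩
      · rw [h]
      · rw [h]
        simp [hq']
    have hstepB : pvStepBL hist bs (m : Int) = bs.set m q := by
      simp only [pvStepBL, ← hqdef, Int.toNat_natCast]
    rw [hstepA, hstepB]
    have hmlt : m < bs.length := by omega
    have hinv' : invL (bs.set m q) := by
      intro j hj
      rcases eq_or_ne j m with rfl | hne
      · rw [getD_set_self _ _ _ hmlt]
        exact ⟨hq1, by omega⟩
      · rw [getD_set_ne _ _ _ _ hne]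
        exact hinv j (by simpa using hj)
    have hchain' : (chainL bs q).reverse ++ [(m : Int)]
        = (chainL (bs.set m q) (((m + 1 : Nat) : Int) - 1)).reverse := by
      have hm' : ((m + 1 : Nat) : Int) - 1 = (m : Int) := by push_cast; ring
      have hpg : PySem.List.pyGetD (bs.set m q) (m : Int) 0 = q := by
        rw [PySem.List.pyGetD_of_nonneg _ _ (by omega), Int.toNat_natCast]
        exact getD_set_self bs m q hmlt
      rw [hm', chainL_cons (bs.set m q) (m : Int) (by omega), hpg,
        show min q ((m : Int) - 1) = q by omega,
        chainL_set bs m q (q + 1).toNat q le_rfl (by omega), List.reverse_cons]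
    have hout' : out ++ [q] = (List.range (m + 1)).map (fun j => (bs.set m q).getD j 0) := by
      rw [List.range_succ, List.map_append, hout]
      congr 1
      · apply List.map_congr_left
        intro j hj
        rw [getD_set_ne _ _ _ _ (by simp at hj; omega)]
      · simp only [List.map_cons, List.map_nil, getD_set_self bs m q hmlt]
    have hcast : ((m + 1 : Nat) : Int) = (m : Int) + 1 := by push_cast; ring
    have := ih (m + 1) ((chainL bs q).reverse ++ [(m : Int)]) (out ++ [q]) (bs.set m q)
      (by omega) (by omega) (by simp [hlen]) hinv' hchain' hout'
    rwa [hcast] at this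

-- main loop invariant, right case
lemma foldR (hist : List Int) :
    ∀ (m : Nat) (stack out bs : List Int),
      m < hist.length →
      bs.length = hist.length → invR (hist.length : Int) bs →
      stack = (chainR (hist.length : Int) bs (m : Int)).reverse →
      out = (bs.drop m).reverse →
      ((PySem.List.pyRange ((m : Int) - 1) (-1) (-1)).foldl (pvStepA hist false)
          (stack, out)).2
        = ((PySem.List.pyRange ((m : Int) - 1) (-1) (-1)).foldl (pvStepBR hist) bs).reverse
      ∧ ((PySem.List.pyRange ((m : Int) - 1) (-1) (-1)).foldl (pvStepBR hist) bs).length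
          = hist.length := by
  intro m
  induction m with
  | zero =>
    intro stack out bs hm hlen hinv hstack hout
    rw [show ((0 : Nat) : Int) - 1 = -1 by norm_num,
      PySem.List.pyRange_neg_one_eq_nil le_rfl]
    simp only [List.foldl_nil]
    exact ⟨by rw [hout]; simp, hlen⟩
  | succ m ih =>
    intro stack out bs hm hlen hinv hstack hout
    have hm' : ((m + 1 : Nat) : Int) - 1 = (m : Int) := by push_cast; ring
    rw [hm', PySem.List.pyRange_neg_one_cons (by omega)]
    simp only [List.foldl_cons]
    obtain ⟨hpop, hq1, hq2⟩ :=
      jumpR_spec hist bs (hist.length : Int) (PySem.List.pyGetD hist (m : Int) 0)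
        (by rw [hlen]) hinv (hist.length + 1) ((m : Int) + 1) (by omega) (by omega) (by omega)
    set q := pvJumpR (hist.length : Int) hist bs (PySem.List.pyGetD hist (m : Int) 0)
      ((m : Int) + 1) (hist.length + 1) with hqdef
    have hcast : ((m + 1 : Nat) : Int) = (m : Int) + 1 := by push_cast; ring
    have hstack' : stack = (chainR (hist.length : Int) bs ((m : Int) + 1)).reverse := by
      rw [hstack, hcast]
    have hL : (chainR (hist.length : Int) bs q).reverse.getLast? = some q
        ∨ (q = (hist.length : Int)
            ∧ (chainR (hist.length : Int) bs q).reverse.getLast? = none) := by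
      by_cases hq : q < (hist.length : Int)
      · refine Or.inl ?_
        rw [chainR_cons _ _ _ hq, List.getLast?_reverse]
        rfl
      · refine Or.inr ⟨by omega, ?_⟩
        rw [show q = (hist.length : Int) by omega, chainR_nil _ _ _ le_rfl]
        rfl
    have hstepA : pvStepA hist false (stack, out) (m : Int)
        = ((chainR (hist.length : Int) bs q).reverse ++ [(m : Int)], out ++ [q]) := by
      simp only [pvStepA, hstack', hpop]
      rcases hL with h | ⟨hq', h⟩
      · rw [h]
      · rw [h]
        simp [hq']
    have hstepB : pvStepBR hist bs (m : Int) = bs.set m q := by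
      simp only [pvStepBR, ← hqdef, Int.toNat_natCast]
    rw [hstepA, hstepB]
    have hmlt : m < bs.length := by omega
    have hinv' : invR (hist.length : Int) (bs.set m q) := by
      intro j hj
      rcases eq_or_ne j m with rfl | hne
      · rw [getD_set_self _ _ _ hmlt]
        exact ⟨by omega, hq2⟩
      · rw [getD_set_ne _ _ _ _ hne]
        exact hinv j (by simpa using hj)
    have hchain' : (chainR (hist.length : Int) bs q).reverse ++ [(m : Int)]
        = (chainR (hist.length : Int) (bs.set m q) (m : Int)).reverse := by
      have hpg : PySem.List.pyGetD (bs.set m q) (m : Int) 0 = q := by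
        rw [PySem.List.pyGetD_of_nonneg _ _ (by omega), Int.toNat_natCast]
        exact getD_set_self bs m q hmlt
      rw [chainR_cons (hist.length : Int) (bs.set m q) (m : Int) (by omega), hpg,
        show max q ((m : Int) + 1) = q by omega,
        chainR_set (hist.length : Int) bs m q ((hist.length : Int) - q).toNat q le_rfl
          (by omega), List.reverse_cons]
    have hout' : out ++ [q] = ((bs.set m q).drop m).reverse := by
      rw [List.drop_eq_getElem_cons (by simpa using hmlt),
        List.getElem_set_self (by simpa using hmlt),
        List.drop_set_of_lt (by omega), List.reverse_cons, hout]
    have := ih ((chainR (hist.length : Int) bs q).reverse ++ [(m : Int)]) (out ++ [q])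
      (bs.set m q) (by omega) (by simp [hlen]) hinv' hchain' hout'
    exact this

lemma getD_repl (n : Nat) (a : Int) (k : Nat) (h : k < n) :
    (List.replicate n a).getD k 0 = a := by
  simp [List.getD, h]

-- ===== VERDICT (by name: the statement is the Claim_ definition above) =====
theorem calculate_borders_spec : Claim_equal_calculate_borders := by
  intro hist left _dom
  unfold Spec_calculate_borders
  by_cases h0 : hist.length = 0
  · obtain rfl : hist = [] := List.length_eq_zero_iff.mp h0
    cases left <;> decide
  · have h1 : 1 ≤ hist.length := by omega
    have hmax : max hist.length 1 = hist.length := Nat.max_eq_left h1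
    cases left
    · -- right borders
      have inv0 : invR (hist.length : Int)
          (List.replicate hist.length (hist.length : Int)) := by
        intro k hk
        have hk' : k < hist.length := by simpa using hk
        rw [getD_repl _ _ _ hk']
        constructor <;> omega
      have hc1 : ((hist.length - 1 : Nat) : Int) = (hist.length : Int) - 1 := by
        push_cast [h1]; ring
      have stack0 : [(hist.length : Int) - 1]
          = (chainR (hist.length : Int) (List.replicate hist.length (hist.length : Int))
              (((hist.length - 1 : Nat)) : Int)).reverse := by
        rw [hc1, chainR_cons _ _ _ (by omega),
          PySem.List.pyGetD_of_nonneg _ _ (by omega),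
          show ((hist.length : Int) - 1).toNat = hist.length - 1 by omega,
          getD_repl _ _ _ (by omega),
          show max ((hist.length : Int)) ((hist.length : Int) - 1 + 1) = (hist.length : Int)
            by omega,
          chainR_nil _ _ _ le_rfl]
        rfl
      have out0 : [(hist.length : Int)]
          = ((List.replicate hist.length (hist.length : Int)).drop
              (hist.length - 1)).reverse := by
        rw [List.drop_replicate, show hist.length - (hist.length - 1) = 1 by omega]
        rfl
      obtain ⟨hA, hBlen⟩ := foldR hist (hist.length - 1) [(hist.length : Int) - 1]
        [(hist.length : Int)] (List.replicate hist.length (hist.length : Int))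
        (by omega) (by simp) inv0 stack0 out0
      have hc2 : ((hist.length - 1 : Nat) : Int) - 1 = (hist.length : Int) - 2 := by
        rw [hc1]; ring
      rw [hc2] at hA hBlen
      simp only [calculate_borders, calculate_borders_alt, hmax, Bool.false_eq_true,
        if_false]
      rw [hA, List.reverse_reverse]
    · -- left borders
      have inv0 : invL (List.replicate hist.length (-1)) := by
        intro k hk
        have hk' : k < hist.length := by simpa using hk
        rw [getD_repl _ _ _ hk']
        constructor <;> omega
      have stack0 : [(0 : Int)]
          = (chainL (List.replicate hist.length (-1)) (((1 : Nat) : Int) - 1)).reverse := by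
        rw [show ((1 : Nat) : Int) - 1 = 0 by norm_num, chainL_cons _ _ le_rfl,
          PySem.List.pyGetD_of_nonneg _ _ le_rfl, Int.toNat_zero,
          getD_repl _ _ _ (by omega),
          show min (-1 : Int) (0 - 1) = -1 by norm_num,
          chainL_nil _ _ (by norm_num)]
        rfl
      have out0 : [(-1 : Int)] = (List.range 1).map
          (fun j => (List.replicate hist.length (-1)).getD j 0) := by
        simp only [List.range_one, List.map_cons, List.map_nil]
        rw [getD_repl _ _ _ h1]
      obtain ⟨hA, hBlen⟩ := foldL hist (hist.length - 1) 1 [0] [-1]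
        (List.replicate hist.length (-1)) (by omega) le_rfl (by simp) inv0 stack0 out0
      rw [Nat.cast_one] at hA hBlen
      simp only [calculate_borders, calculate_borders_alt, hmax, if_true]
      rw [hA]
      conv_rhs => rw [← map_getD_range (List.foldl (pvStepBL hist)
        (List.replicate hist.length (-1)) (PySem.List.pyRange 1 (hist.length : Int) 1)),
        hBlen]
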